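-- pv_equiv track=rewrite | github.com/Brunapupo/connect4-game | juiz.py | _verifica_diagonal_secundaria
-- ===== SOURCE A (Python) =====
-- def _verifica_diagonal_secundaria(resultado, numeros, tabuleiro):
--     linha = 1
--     cont = 0
--     tam = len(numeros)
--     coluna = tam - 2
--     while linha < tam - 1:
--         posicao_atual = tabuleiro[linha][coluna]
--         if posicao_atual == tabuleiro[linha-1][coluna+1] and posicao_atual != '______':
--             cont += 1
--             if cont == 3:
--                 resultado = True
--         else:
--             cont = 0
--         linha = linha + 1
--         coluna = coluna - 1
--     return resultado
-- ===== SOURCE B (Python) =====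
-- def _verifica_diagonal_secundaria(resultado, numeros, tabuleiro):
--     tam = len(numeros)
--     diag = [tabuleiro[r][tam - 1 - r] for r in range(tam - 1)]
--     for i in range(len(diag) - 3):
--         if diag[i] == diag[i + 1] == diag[i + 2] == diag[i + 3] and diag[i] != '______':
--             resultado = True
--     return resultado
-- ===== Notes on version B (the rewrite author's own statement) =====
-- stated objective: simpler
-- what changed: A's incremental run-counter over the anti-diagonal with mutable linha/coluna/cont state is replaced by extracting the anti-diagonal into a list once and sliding a fixed window of four over it.
-- outside the precondition, e.g. on _verifica_diagonal_secundaria(False, [1, 2], [['x']]): A returns False, B raises IndexError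
import Mathlib
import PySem

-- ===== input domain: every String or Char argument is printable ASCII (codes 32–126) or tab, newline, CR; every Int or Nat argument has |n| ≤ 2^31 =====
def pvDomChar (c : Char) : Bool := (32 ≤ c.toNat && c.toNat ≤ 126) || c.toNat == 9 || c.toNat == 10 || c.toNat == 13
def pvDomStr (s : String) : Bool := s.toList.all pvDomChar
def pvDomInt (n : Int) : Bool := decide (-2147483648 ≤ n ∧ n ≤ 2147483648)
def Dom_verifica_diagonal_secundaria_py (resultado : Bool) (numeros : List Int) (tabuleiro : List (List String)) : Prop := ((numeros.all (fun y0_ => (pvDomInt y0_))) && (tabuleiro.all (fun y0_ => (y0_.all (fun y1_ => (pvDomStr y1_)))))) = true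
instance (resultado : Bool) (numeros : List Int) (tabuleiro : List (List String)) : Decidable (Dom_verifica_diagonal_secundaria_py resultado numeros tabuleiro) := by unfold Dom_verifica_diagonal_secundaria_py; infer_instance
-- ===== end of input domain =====

-- B replaces A's incremental run-counter over the anti-diagonal by extracting the
-- diagonal into a list once and sliding a fixed window of four over it (simpler decomposition).


-- ===== PORT A =====
-- tabuleiro[r][c]; under Pre_ the indices are in range, so the `getD` totalisation
-- never fires on admitted inputs (where Python raises IndexError, Pre_ excludes).
def pvCell (tab : List (List String)) (r c : Int) : String :=
  (PySem.List.pyGet? ((PySem.List.pyGet? tab r).getD []) c).getD ""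

-- the `while linha < tam - 1` loop of A; fuel = number of remaining iterations
def pvLoopA (tab : List (List String)) : Nat → Int → Int → Int → Bool → Bool
  | 0, _, _, _, res => res
  | Nat.succ f, linha, coluna, cont, res =>
    let pos := pvCell tab linha coluna
    if pos = pvCell tab (linha - 1) (coluna + 1) ∧ pos ≠ "______" then
      let cont' := cont + 1
      pvLoopA tab f (linha + 1) (coluna - 1) cont' (if cont' = 3 then true else res)
    else
      pvLoopA tab f (linha + 1) (coluna - 1) 0 res

def verifica_diagonal_secundaria_py (resultado : Bool) (numeros : List Int) (tabuleiro : List (List String)) : Bool :=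
  let tam : Int := numeros.length
  pvLoopA tabuleiro (tam - 2).toNat 1 (tam - 2) 0 resultado

-- ===== PORT B =====
-- diag = [tabuleiro[r][tam-1-r] for r in range(tam-1)]
def pvDiag (tabuleiro : List (List String)) (tam : Nat) : List String :=
  (List.range (tam - 1)).map (fun (r : Nat) => pvCell tabuleiro (r : Int) ((tam : Int) - 1 - (r : Int)))

def verifica_diagonal_secundaria_py_alt (resultado : Bool) (numeros : List Int) (tabuleiro : List (List String)) : Bool :=
  let tam : Nat := numeros.length
  let diag := pvDiag tabuleiro tam
  (List.range (diag.length - 3)).foldl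
    (fun res i =>
      if diag.getD i "" = diag.getD (i + 1) "" ∧ diag.getD (i + 1) "" = diag.getD (i + 2) "" ∧
         diag.getD (i + 2) "" = diag.getD (i + 3) "" ∧ diag.getD i "" ≠ "______"
      then true else res) resultado

-- ===== PRECONDITION & SPEC =====
-- Pre_: every anti-diagonal cell (r, tam-1-r), r < tam-1, exists. This is exactly where
-- neither program raises an IndexError; it additionally excludes tam = 2 boards missing
-- cell (0,1), where A touches no cell and returns resultado but B's extraction raises.
def Pre_verifica_diagonal_secundaria_py (resultado : Bool) (numeros : List Int) (tabuleiro : List (List String)) : Prop :=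
  ∀ r < numeros.length - 1, r < tabuleiro.length ∧ numeros.length - 1 - r < (tabuleiro.getD r []).length
instance (resultado : Bool) (numeros : List Int) (tabuleiro : List (List String)) : Decidable (Pre_verifica_diagonal_secundaria_py resultado numeros tabuleiro) := by unfold Pre_verifica_diagonal_secundaria_py; infer_instance

def pvWitness_verifica_diagonal_secundaria_py : Bool × List Int × List (List String) :=
  (false, [1, 2, 3, 4, 5],
   [["X", "O", "X", "O", "X"], ["______", "X", "O", "X", "O"], ["X", "O", "X", "O", "X"],
    ["O", "X", "O", "X", "O"], ["X", "O", "X", "O", "______"]])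

def Spec_verifica_diagonal_secundaria_py (resultado : Bool) (numeros : List Int) (tabuleiro : List (List String)) (out : Bool) : Prop := out = verifica_diagonal_secundaria_py_alt resultado numeros tabuleiro
instance (resultado : Bool) (numeros : List Int) (tabuleiro : List (List String)) (out : Bool) : Decidable (Spec_verifica_diagonal_secundaria_py resultado numeros tabuleiro out) := by unfold Spec_verifica_diagonal_secundaria_py; infer_instance

-- ===== CLAIM (what is proved, stated in full; the proofs are below) =====
def Claim_equal_verifica_diagonal_secundaria_py : Prop := ∀ (resultado : Bool) (numeros : List Int) (tabuleiro : List (List String)), Dom_verifica_diagonal_secundaria_py resultado numeros tabuleiro → Pre_verifica_diagonal_secundaria_py resultado numeros tabuleiro → Spec_verifica_diagonal_secundaria_py resultado numeros tabuleiro (verifica_diagonal_secundaria_py resultado numeros tabuleiro)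

-- ===== LEMMAS AND PROOFS =====

-- "the next k diagonal cells each equal their predecessor and are non-empty"
def pvMatchRun : List String → String → Nat → Bool
  | _, _, 0 => true
  | [], _, _ + 1 => false
  | x :: xs, p, k + 1 => if x = p ∧ x ≠ "______" then pvMatchRun xs x k else false

-- "some window of four consecutive equal non-empty cells"
def pvWin4 : List String → Bool
  | a :: b :: c :: d :: rest =>
      if a = b ∧ b = c ∧ c = d ∧ a ≠ "______" then true else pvWin4 (b :: c :: d :: rest)
  | _ => false

-- abstraction of A's counter loop over the remaining diagonal cells
def pvWinC : List String → String → Int → Bool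
  | [], _, _ => false
  | x :: xs, prev, cont =>
      if x = prev ∧ x ≠ "______" then
        (if cont + 1 = 3 then true else false) || pvWinC xs x (cont + 1)
      else pvWinC xs x 0

-- the diagonal cells from row s on, f of them
def pvCellsFrom (tab : List (List String)) (tam : Nat) (s f : Nat) : List String :=
  (List.range f).map (fun (i : Nat) => pvCell tab (((s + i : Nat)) : Int) ((tam : Int) - 1 - ((s + i : Nat) : Int)))

theorem pvMatchRun_mono (l : List String) (p : String) (j k : Nat) (hjk : j ≤ k)
    (h : pvMatchRun l p k = true) : pvMatchRun l p j = true := by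
  induction l generalizing p j k with
  | nil =>
    cases j with
    | zero => rfl
    | succ j =>
      cases k with
      | zero => omega
      | succ k => simp [pvMatchRun] at h
  | cons x xs ih =>
    cases j with
    | zero => rfl
    | succ j =>
      cases k with
      | zero => omega
      | succ k =>
        simp only [pvMatchRun] at h ⊢
        by_cases hc : x = p ∧ x ≠ "______"
        · rw [if_pos hc] at h ⊢; exact ih x j k (by omega) h
        · rw [if_neg hc] at h; exact absurd h (by simp)

theorem pvMatchRun3_head (x : String) (xs : List String) :
    pvMatchRun xs x 3 =
      (match xs with
       | a :: b :: c :: _ => if x = a ∧ a = b ∧ b = c ∧ x ≠ "______" then true else false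
       | _ => false) := by
  match xs with
  | [] => rfl
  | [a] =>
    simp only [pvMatchRun]
    by_cases h : a = x ∧ a ≠ "______" <;> simp [h]
  | [a, b] =>
    simp only [pvMatchRun]
    by_cases h1 : a = x ∧ a ≠ "______" <;> by_cases h2 : b = a ∧ b ≠ "______" <;>
      simp [h1, h2]
  | a :: b :: c :: r =>
    simp only [pvMatchRun]
    by_cases h1 : a = x ∧ a ≠ "______"
    · by_cases h2 : b = a ∧ b ≠ "______"
      · by_cases h3 : c = b ∧ c ≠ "______"
        · rw [if_pos h1, if_pos h2, if_pos h3]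
          rw [if_pos ⟨h1.1.symm, h2.1.symm, h3.1.symm, h1.1 ▸ h1.2⟩]
        · rw [if_pos h1, if_pos h2, if_neg h3, if_neg]
          rintro ⟨e1, e2, e3, ne⟩
          exact h3 ⟨e3.symm, fun hbl => ne (by rw [e1, e2, e3]; exact hbl)⟩
      · rw [if_pos h1, if_neg h2, if_neg]
        rintro ⟨e1, e2, e3, ne⟩
        exact h2 ⟨e2.symm, fun hbl => ne (by rw [e1, e2]; exact hbl)⟩
    · rw [if_neg h1, if_neg]
      rintro ⟨e1, e2, e3, ne⟩
      exact h1 ⟨e1.symm, fun hbl => ne (by rw [e1]; exact hbl)⟩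

theorem pvWin4_cons (x : String) (xs : List String) :
    pvWin4 (x :: xs) = (pvMatchRun xs x 3 || pvWin4 xs) := by
  rw [pvMatchRun3_head]
  match xs with
  | [] => rfl
  | [a] => rfl
  | [a, b] => rfl
  | a :: b :: c :: r =>
    simp only [pvWin4]
    by_cases h : x = a ∧ a = b ∧ b = c ∧ x ≠ "______" <;> simp [h]

theorem pvWinC_eq (xs : List String) (prev : String) (cont : Int)
    (h0 : 0 ≤ cont) (h3 : cont < 3) :
    pvWinC xs prev cont = (pvMatchRun xs prev (3 - cont).toNat || pvWin4 xs) := by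
  induction xs generalizing prev cont with
  | nil =>
    have ht : (3 - cont).toNat = ((3 - cont).toNat - 1) + 1 := by omega
    rw [ht]
    simp [pvWinC, pvMatchRun, pvWin4]
  | cons x xs ih =>
    simp only [pvWinC]
    by_cases hm : x = prev ∧ x ≠ "______"
    · rw [if_pos hm]
      by_cases hc : cont + 1 = 3
      · rw [if_pos hc]
        have ht : (3 - cont).toNat = 1 := by omega
        rw [ht]
        have hl : pvMatchRun (x :: xs) prev 1 = true := by
          simp only [pvMatchRun]
          rw [if_pos hm]
        rw [hl]
        simp
      · rw [if_neg hc, Bool.false_or, ih x (cont + 1) (by omega) (by omega)]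
        have ht : (3 - cont).toNat = (3 - (cont + 1)).toNat + 1 := by omega
        rw [ht, pvWin4_cons]
        have hL : pvMatchRun (x :: xs) prev ((3 - (cont + 1)).toNat + 1)
            = pvMatchRun xs x (3 - (cont + 1)).toNat := by
          simp only [pvMatchRun]
          rw [if_pos hm]
        rw [hL]
        cases hr : pvMatchRun xs x (3 - (cont + 1)).toNat with
        | true => rw [Bool.true_or, Bool.true_or]
        | false =>
          rw [Bool.false_or, Bool.false_or]
          cases h3' : pvMatchRun xs x 3 with
          | false => rw [Bool.false_or]
          | true =>
            exact absurd (pvMatchRun_mono xs x ((3 - (cont + 1)).toNat) 3 (by omega) h3') (by rw [hr]; simp)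
    · rw [if_neg hm, ih x 0 (by omega) (by omega)]
      have ht : ((3 : Int) - 0).toNat = 3 := by decide
      rw [ht, pvWin4_cons]
      have hfalse : pvMatchRun (x :: xs) prev (3 - cont).toNat = false := by
        have h1 : (3 - cont).toNat = ((3 - cont).toNat - 1) + 1 := by omega
        rw [h1]
        simp only [pvMatchRun]
        rw [if_neg hm]
      rw [hfalse, Bool.false_or]

theorem pvCellsFrom_succ (tab : List (List String)) (tam s f : Nat) :
    pvCellsFrom tab tam s (f + 1) =
      pvCell tab s ((tam : Int) - 1 - s) :: pvCellsFrom tab tam (s + 1) f := by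
  unfold pvCellsFrom
  rw [List.range_succ_eq_map, List.map_cons, List.map_map]
  congr 1
  apply List.map_congr_left
  intro i _
  simp only [Function.comp_apply, Nat.succ_eq_add_one]
  have h : s + (i + 1) = (s + 1) + i := by omega
  rw [h]

-- A-side: the counting loop equals pvWinC over the remaining diagonal cells
theorem pvLoopA_eq (tab : List (List String)) (tam : Nat) :
    ∀ (f r : Nat) (cont : Int) (res : Bool),
      pvLoopA tab f ((r : Int) + 1) ((tam : Int) - 2 - r) cont res =
        (res || pvWinC (pvCellsFrom tab tam (r + 1) f)
                  (pvCell tab r ((tam : Int) - 1 - r)) cont) := by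
  intro f
  induction f with
  | zero =>
    intro r cont res
    simp [pvLoopA, pvCellsFrom, pvWinC]
  | succ f ih =>
    intro r cont res
    rw [pvCellsFrom_succ]
    simp only [pvLoopA]
    have e1 : (r : Int) + 1 - 1 = (r : Int) := by ring
    have e2 : (tam : Int) - 2 - r + 1 = (tam : Int) - 1 - r := by ring
    have e3 : (r : Int) + 1 + 1 = ((r + 1 : Nat) : Int) + 1 := by push_cast; ring
    have e4 : (tam : Int) - 2 - r - 1 = (tam : Int) - 2 - ((r + 1 : Nat) : Int) := by
      push_cast; ring
    have ehead : pvCell tab (((r + 1 : Nat) : Int)) ((tam : Int) - 1 - ((r + 1 : Nat) : Int))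
        = pvCell tab ((r : Int) + 1) ((tam : Int) - 2 - r) := by
      have a1 : ((r + 1 : Nat) : Int) = (r : Int) + 1 := by push_cast; ring
      rw [a1]
      have a2 : (tam : Int) - 1 - ((r : Int) + 1) = (tam : Int) - 2 - r := by ring
      rw [a2]
    rw [e1, e2, e3, e4]
    simp only [pvWinC]
    rw [ehead]
    by_cases hm : pvCell tab ((r : Int) + 1) ((tam : Int) - 2 - r)
        = pvCell tab r ((tam : Int) - 1 - r)
        ∧ pvCell tab ((r : Int) + 1) ((tam : Int) - 2 - r) ≠ "______"
    · rw [if_pos hm, if_pos hm, ih (r + 1), ehead]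
      by_cases hc : cont + 1 = 3
      · rw [if_pos hc, if_pos hc]
        simp
      · rw [if_neg hc, if_neg hc, Bool.false_or]
    · rw [if_neg hm, if_neg hm, ih (r + 1), ehead]

-- B-side: the fold over windows is res || "any window", then "any window" = pvWin4
theorem pvFoldl_or (C : Nat → Prop) [DecidablePred C] :
    ∀ (L : List Nat) (res : Bool),
      L.foldl (fun res i => if C i then true else res) res
        = (res || L.any (fun i => decide (C i))) := by
  intro L
  induction L with
  | nil => intro res; simp
  | cons x xs ih =>
    intro res
    simp only [List.foldl_cons, List.any_cons]
    rw [ih]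
    by_cases h : C x <;> simp [h]

theorem pvWin4_short (l : List String) (h : l.length < 4) : pvWin4 l = false := by
  match l with
  | [] => rfl
  | [a] => rfl
  | [a, b] => rfl
  | [a, b, c] => rfl
  | a :: b :: c :: d :: r => simp at h; omega

theorem pvAnyRange_win4 (l : List String) :
    (List.range (l.length - 3)).any
      (fun i => decide (l.getD i "" = l.getD (i + 1) "" ∧ l.getD (i + 1) "" = l.getD (i + 2) "" ∧
        l.getD (i + 2) "" = l.getD (i + 3) "" ∧ l.getD i "" ≠ "______")) = pvWin4 l := by
  induction l with
  | nil => rfl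
  | cons x xs ih =>
    by_cases hlen : xs.length < 3
    · have h0 : (x :: xs).length - 3 = 0 := by simp; omega
      rw [h0]
      have hw : pvWin4 (x :: xs) = false := pvWin4_short _ (by simp; omega)
      rw [hw]
      rfl
    · obtain ⟨a, b, c, r, rfl⟩ : ∃ a b c r, xs = a :: b :: c :: r := by
        match xs, hlen with
        | a :: b :: c :: r, _ => exact ⟨a, b, c, r, rfl⟩
        | [], h => exact absurd (by simp) h
        | [a], h => exact absurd (by simp) h
        | [a, b], h => exact absurd (by simp) h
      have h1 : (x :: a :: b :: c :: r).length - 3 = ((a :: b :: c :: r).length - 3) + 1 := by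
        simp
      rw [h1, List.range_succ_eq_map, List.any_cons, List.any_map]
      have h2 : ((List.range ((a :: b :: c :: r).length - 3)).any
          ((fun i => decide ((x :: a :: b :: c :: r).getD i "" = (x :: a :: b :: c :: r).getD (i + 1) "" ∧
            (x :: a :: b :: c :: r).getD (i + 1) "" = (x :: a :: b :: c :: r).getD (i + 2) "" ∧
            (x :: a :: b :: c :: r).getD (i + 2) "" = (x :: a :: b :: c :: r).getD (i + 3) "" ∧
            (x :: a :: b :: c :: r).getD i "" ≠ "______")) ∘ (· + 1)))
          = pvWin4 (a :: b :: c :: r) := by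
        rw [← ih]
        exact List.any_congr rfl (fun i => rfl)
      rw [h2]
      simp only [List.getD_cons_zero, List.getD_cons_succ]
      show (decide (x = a ∧ a = b ∧ b = c ∧ x ≠ "______") || pvWin4 (a :: b :: c :: r))
          = pvWin4 (x :: a :: b :: c :: r)
      simp only [pvWin4]
      by_cases h : x = a ∧ a = b ∧ b = c ∧ x ≠ "______" <;> simp [h]

theorem pvDiag_cons (tab : List (List String)) (tam : Nat) (h : 2 ≤ tam) :
    pvDiag tab tam = pvCell tab 0 ((tam : Int) - 1) :: pvCellsFrom tab tam 1 (tam - 2) := by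
  unfold pvDiag
  have h1 : tam - 1 = (tam - 2) + 1 := by omega
  rw [h1, List.range_succ_eq_map, List.map_cons, List.map_map]
  congr 1
  · simp
  · unfold pvCellsFrom
    apply List.map_congr_left
    intro i _
    simp only [Function.comp]
    have h2 : (1 : Nat) + i = i + 1 := by omega
    rw [h2]

theorem pvAlt_eq (resultado : Bool) (numeros : List Int) (tabuleiro : List (List String)) :
    verifica_diagonal_secundaria_py_alt resultado numeros tabuleiro
      = (resultado || pvWin4 (pvDiag tabuleiro numeros.length)) := by
  show (List.range ((pvDiag tabuleiro numeros.length).length - 3)).foldl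
      (fun res i =>
        if (pvDiag tabuleiro numeros.length).getD i "" = (pvDiag tabuleiro numeros.length).getD (i + 1) "" ∧
           (pvDiag tabuleiro numeros.length).getD (i + 1) "" = (pvDiag tabuleiro numeros.length).getD (i + 2) "" ∧
           (pvDiag tabuleiro numeros.length).getD (i + 2) "" = (pvDiag tabuleiro numeros.length).getD (i + 3) "" ∧
           (pvDiag tabuleiro numeros.length).getD i "" ≠ "______"
        then true else res) resultado
      = (resultado || pvWin4 (pvDiag tabuleiro numeros.length))
  rw [pvFoldl_or, pvAnyRange_win4]

theorem pvA_eq (resultado : Bool) (numeros : List Int) (tabuleiro : List (List String)) :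
    verifica_diagonal_secundaria_py resultado numeros tabuleiro
      = (resultado || pvWin4 (pvDiag tabuleiro numeros.length)) := by
  show pvLoopA tabuleiro (((numeros.length : Int)) - 2).toNat 1 (((numeros.length : Int)) - 2) 0 resultado
      = (resultado || pvWin4 (pvDiag tabuleiro numeros.length))
  by_cases h2 : 2 ≤ numeros.length
  · have hf : (((numeros.length : Int)) - 2).toNat = numeros.length - 2 := by omega
    have hl : (1 : Int) = ((0 : Nat) : Int) + 1 := by norm_num
    have hc : ((numeros.length : Int)) - 2 = ((numeros.length : Int)) - 2 - ((0 : Nat) : Int) := by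
      norm_num
    rw [hf, hl, hc, pvLoopA_eq tabuleiro numeros.length (numeros.length - 2) 0 0 resultado]
    rw [pvWinC_eq _ _ 0 (by omega) (by omega)]
    have ht : ((3 : Int) - 0).toNat = 3 := by decide
    rw [ht, pvDiag_cons tabuleiro numeros.length h2, pvWin4_cons]
    have hz : pvCell tabuleiro ((0 : Nat) : Int) ((numeros.length : Int) - 1 - ((0 : Nat) : Int))
        = pvCell tabuleiro 0 ((numeros.length : Int) - 1) := by norm_num
    rw [Nat.zero_add, hz]
  · have hf : (((numeros.length : Int)) - 2).toNat = 0 := by omega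
    rw [hf]
    have hd : pvWin4 (pvDiag tabuleiro numeros.length) = false := by
      apply pvWin4_short
      unfold pvDiag
      simp
      omega
    rw [hd]
    simp [pvLoopA]

-- ===== VERDICT (by name: the statement is the Claim_ definition above) =====
theorem verifica_diagonal_secundaria_py_spec : Claim_equal_verifica_diagonal_secundaria_py := by
  intro resultado numeros tabuleiro _ _
  unfold Spec_verifica_diagonal_secundaria_py
  rw [pvA_eq, pvAlt_eq]
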